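-- pv_equiv track=rewrite | github.com/vs-uulm/nemesys | src/nemere/inference/segments.py | plateouStart
-- ===== SOURCE A (Python) =====
-- from typing import Dict, List, Union, Type, Any, Tuple, Iterable, Sequence, TypeVar
--
-- def plateouStart(sequence) -> Tuple[List, List]:
--     """
--     Determine begins of sequences of plateaus in value.
--
--     :param sequence: A sequence of subscriptable values.
--     :return: a list of two lists:
--         (1) the sequence indices of the plateau begins,
--         and (2) the corresponding values.
--     """
--     plateau = ([], [])
--     for index, center in enumerate(sequence[1:-1], 1):
--         before = sequence[index - 1]
--         after = sequence[index + 1]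
--         if before != center == after:
--             plateau[0].append(index)
--             plateau[1].append(center)
--     return plateau
-- ===== SOURCE B (Python) =====
-- from itertools import groupby
--
-- def plateouStart(sequence):
--     """Run-grouping reimplementation: emit the start index and value of every
--     maximal run of equal consecutive values of length >= 2 that begins at
--     index >= 1."""
--     indices, values = [], []
--     start = 0
--     for value, group in groupby(sequence):
--         run = sum(1 for _ in group)
--         if start >= 1 and run >= 2:
--             indices.append(start)
--             values.append(value)
--         start += run
--     return (indices, values)
-- ===== Notes on version B (the rewrite author's own statement) =====
-- stated objective: idiomatic
-- what changed: Replaced the per-element before/centre/after neighbour test over enumerate(sequence[1:-1], 1) by a single itertools.groupby pass that tracks each run's start index and emits every maximal equal-run of length >= 2 beginning at index >= 1.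
import Mathlib
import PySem

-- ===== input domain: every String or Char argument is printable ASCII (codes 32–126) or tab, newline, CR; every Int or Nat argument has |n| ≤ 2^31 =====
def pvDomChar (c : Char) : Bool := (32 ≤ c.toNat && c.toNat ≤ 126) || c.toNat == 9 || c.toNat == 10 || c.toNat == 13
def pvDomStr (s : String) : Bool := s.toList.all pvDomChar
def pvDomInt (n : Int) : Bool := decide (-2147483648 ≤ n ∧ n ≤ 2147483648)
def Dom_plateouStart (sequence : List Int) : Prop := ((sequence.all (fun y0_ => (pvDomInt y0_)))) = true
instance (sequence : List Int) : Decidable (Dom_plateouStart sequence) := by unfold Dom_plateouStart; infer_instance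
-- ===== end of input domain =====

-- B replaces A's per-element before/centre/after neighbour test by an
-- itertools.groupby run-grouping pass; same return value, alternative structure.

-- ===== PORT A =====
-- for index, center in enumerate(sequence[1:-1], 1): before/after neighbour
-- test, appending to the pair of lists.  sequence[index-1] and sequence[index+1]
-- are always in range for the enumerated indices, so pyGet?.getD 0 is exact.
def plateouStart (sequence : List Int) : List Int × List Int :=
  (PySem.List.enumerate (PySem.List.slice sequence (some 1) (some (-1))) 1).foldl
    (fun plateau ic =>
      let index := ic.1
      let center := ic.2
      let before := (PySem.List.pyGet? sequence (index - 1)).getD 0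
      let after := (PySem.List.pyGet? sequence (index + 1)).getD 0
      if before ≠ center ∧ center = after then
        (plateau.1 ++ [index], plateau.2 ++ [center])
      else plateau)
    ([], [])

-- ===== PORT B =====
-- groupby: split off the maximal run of the head value (count of the further
-- equal elements, and the remainder of the list).
def runSplit (v : Int) : List Int → Nat × List Int
  | [] => (0, [])
  | x :: xs => if x = v then ((runSplit v xs).1 + 1, (runSplit v xs).2) else (0, x :: xs)

theorem runSplit_snd_length_le (v : Int) (xs : List Int) : (runSplit v xs).2.length ≤ xs.length := by
  induction xs with
  | nil => simp [runSplit]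
  | cons x t ih =>
    by_cases h : x = v
    · simp [runSplit, h]; omega
    · simp [runSplit, h]

-- the groupby loop of Source B: `start` is the index of the current group's first element
def loopB (start : Int) : List Int → List Int × List Int
  | [] => ([], [])
  | x :: xs =>
    let n := (runSplit x xs).1
    let rest := (runSplit x xs).2
    let run : Nat := n + 1
    let tail := loopB (start + run) rest
    if 1 ≤ start ∧ 2 ≤ run then (start :: tail.1, x :: tail.2) else tail
  termination_by l => l.length
  decreasing_by
    have := runSplit_snd_length_le x xs
    simp only [List.length_cons]
    omega

def plateouStart_alt (sequence : List Int) : List Int × List Int :=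
  loopB 0 sequence

-- ===== PRECONDITION & SPEC =====
def Spec_plateouStart (sequence : List Int) (out : List Int × List Int) : Prop := out = plateouStart_alt sequence
instance (sequence : List Int) (out : List Int × List Int) : Decidable (Spec_plateouStart sequence out) := by unfold Spec_plateouStart; infer_instance

-- ===== CLAIM (what is proved, stated in full; the proofs are below) =====
def Claim_equal_plateouStart : Prop := ∀ (sequence : List Int), Dom_plateouStart sequence → Spec_plateouStart sequence (plateouStart sequence)

-- ===== LEMMAS AND PROOFS =====

-- A's loop, restated structurally: the head of the list is the element at index i-1
def auxA (i : Int) : List Int → List Int × List Int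
  | b :: c :: a :: r =>
    let t := auxA (i + 1) (c :: a :: r)
    if b ≠ c ∧ c = a then (i :: t.1, c :: t.2) else t
  | _ => ([], [])

-- the step function of A's fold
def stepA (seq : List Int) (plateau : List Int × List Int) (ic : Int × Int) : List Int × List Int :=
  if (PySem.List.pyGet? seq (ic.1 - 1)).getD 0 ≠ ic.2 ∧ ic.2 = (PySem.List.pyGet? seq (ic.1 + 1)).getD 0 then
    (plateau.1 ++ [ic.1], plateau.2 ++ [ic.2])
  else plateau

theorem plateouStart_eq_fold (seq : List Int) :
    plateouStart seq =
      (PySem.List.enumerate (PySem.List.slice seq (some 1) (some (-1))) 1).foldl (stepA seq) ([], []) := rfl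

theorem slice_one_neg_one (xs : List Int) :
    PySem.List.slice xs (some 1) (some (-1)) = xs.tail.dropLast := by
  rcases xs with _ | ⟨x, t⟩
  · simp [PySem.List.slice]
  · simp [PySem.List.slice, PySem.List.clampIdx, List.dropLast_eq_take]
    rw [if_neg (show ¬((t.length : Int) < 0) by omega)]
    omega

theorem stepA_acc (seq : List Int) (L : List (Int × Int)) (acc : List Int × List Int) :
    L.foldl (stepA seq) acc =
      (acc.1 ++ (L.foldl (stepA seq) ([], [])).1, acc.2 ++ (L.foldl (stepA seq) ([], [])).2) := by
  induction L generalizing acc with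
  | nil => simp
  | cons p t ih =>
    simp only [List.foldl_cons]
    rw [ih (stepA seq acc p), ih (stepA seq ([], []) p)]
    simp only [stepA]
    split_ifs with h <;> simp

theorem dropLast_drop_comm (l : List Int) (i : Nat) : l.dropLast.drop i = (l.drop i).dropLast := by
  simp [List.dropLast_eq_take, List.drop_take]
  omega

-- the fold over the enumerated middle of the sequence, with before/after looked
-- up in the full sequence, is the three-element-window recursion auxA
theorem fold_eq_auxA (full : List Int) (fuel k : Nat) (hf : full.length ≤ k + fuel) :
    (PySem.List.enumerate (full.tail.dropLast.drop k) ((k : Int) + 1)).foldl (stepA full) ([], [])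
      = auxA ((k : Int) + 1) (full.drop k) := by
  induction fuel generalizing k with
  | zero =>
    have h1 : full.drop k = [] := List.drop_eq_nil_of_le (by omega)
    have h2 : full.tail.dropLast.drop k = [] := List.drop_eq_nil_of_le (by simp; omega)
    rw [h1, h2]
    simp [PySem.List.enumerate, auxA]
  | succ fuel ih =>
    rcases hd : full.drop k with _ | ⟨b, d⟩
    · have h2 : full.tail.dropLast.drop k = [] := by
        have : full.length ≤ k := by
          have := congrArg List.length hd; simp at this; omega
        exact List.drop_eq_nil_of_le (by simp; omega)
      rw [h2]; simp [PySem.List.enumerate, auxA]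
    · rcases d with _ | ⟨c, e⟩
      · -- one element left: middle is empty from position k on
        have hlen : full.length = k + 1 := by
          have := congrArg List.length hd; simp at this; omega
        have h2 : full.tail.dropLast.drop k = [] := List.drop_eq_nil_of_le (by simp; omega)
        rw [h2]; simp [PySem.List.enumerate, auxA]
      · rcases e with _ | ⟨a, r⟩
        · -- two elements left
          have hlen : full.length = k + 2 := by
            have := congrArg List.length hd; simp at this; omega
          have h2 : full.tail.dropLast.drop k = [] := List.drop_eq_nil_of_le (by simp; omega)
          rw [h2]; simp [PySem.List.enumerate, auxA]
        · -- three or more: full.drop k = b :: c :: a :: r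
          have hlen : full.length = k + 3 + r.length := by
            have := congrArg List.length hd; simp at this; omega
          -- the middle from position k starts with c
          have hdk1 : full.drop (k + 1) = c :: a :: r := by
            have : full.drop (k+1) = (full.drop k).drop 1 := by
              rw [List.drop_drop]
            rw [this, hd]; rfl
          have hmid : full.tail.dropLast.drop k = c :: (a :: r).dropLast := by
            rw [← List.drop_one, dropLast_drop_comm,
                List.drop_drop, show 1 + k = k + 1 by omega, hdk1]
            rfl
          have hmid2 : (a :: r).dropLast = full.tail.dropLast.drop (k + 1) := by
            rw [← List.drop_one, dropLast_drop_comm,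
                List.drop_drop, show 1 + (k+1) = k + 2 by omega]
            have : full.drop (k+2) = (full.drop (k+1)).drop 1 := by
              rw [List.drop_drop]
            rw [this, hdk1]
            rfl
          -- the two neighbour lookups
          have hgb : full[k]? = some b := by
            have h0 : (List.drop k full)[0]? = full[k + 0]? := List.getElem?_drop
            rw [hd] at h0; simpa using h0.symm
          have hga : full[k + 2]? = some a := by
            have h0 : (List.drop k full)[2]? = full[k + 2]? := List.getElem?_drop
            rw [hd] at h0; simpa using h0.symm
          have hstep : ∀ acc, stepA full acc ((k : Int) + 1, c) =
              if b ≠ c ∧ c = a then (acc.1 ++ [(k : Int) + 1], acc.2 ++ [c]) else acc := by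
            intro acc
            unfold stepA
            have e1 : ((k : Int) + 1 - 1) = ((k : Nat) : Int) := by ring
            have e2 : ((k : Int) + 1 + 1) = (((k + 2 : Nat)) : Int) := by push_cast; ring
            simp only [e1, e2, PySem.List.pyGet?_natCast, hgb, hga, Option.getD_some]
          rw [hmid, PySem.List.enumerate_cons, List.foldl_cons, hstep,
              stepA_acc, hmid2]
          have harith : ((k : Int) + 1) + 1 = ((k + 1 : Nat) : Int) + 1 := by push_cast; ring
          have hih := ih (k + 1) (by omega)
          rw [harith, hih, hdk1, auxA]
          have he : ((k : Int) + 1) + 1 = ((k + 1 : Nat) : Int) + 1 := by push_cast; ring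
          rw [he]
          by_cases hc : b ≠ c ∧ c = a
          · obtain ⟨hbc, hca⟩ := hc
            subst hca
            simp [hbc]
          · simp [hc]

theorem auxA_skip (n : Nat) (i : Int) (c : Int) (rest : List Int) :
    auxA i (c :: (List.replicate n c ++ rest)) = auxA (i + n) (c :: rest) := by
  induction n generalizing i with
  | zero => simp
  | succ m ih =>
    rcases h : List.replicate m c ++ rest with _ | ⟨x, xs⟩
    · rcases List.append_eq_nil_iff.mp h with ⟨hm, hr⟩
      have hm0 : m = 0 := by simpa using congrArg List.length hm
      subst hr; subst hm0
      simp [auxA]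
    · have h1 : auxA i (c :: (List.replicate (m+1) c ++ rest)) = auxA (i+1) (c :: (List.replicate m c ++ rest)) := by
        simp [List.replicate_succ, h, auxA]
      rw [h1, ih]
      congr 1
      push_cast
      ring

theorem runSplit_decomp (v : Int) (xs : List Int) :
    xs = List.replicate (runSplit v xs).1 v ++ (runSplit v xs).2 ∧
      (∀ y ∈ (runSplit v xs).2.head?, y ≠ v) := by
  induction xs with
  | nil => simp [runSplit]
  | cons x t ih =>
    by_cases h : x = v
    · subst h
      refine ⟨?_, ?_⟩
      · simp only [runSplit]
        exact congrArg _ ih.1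
      · simpa [runSplit] using ih.2
    · simp [runSplit, h]

theorem loopB_cons (i : Int) (x : Int) (xs : List Int) :
    loopB i (x :: xs) =
      if 1 ≤ i ∧ 2 ≤ (runSplit x xs).1 + 1 then
        (i :: (loopB (i + ((runSplit x xs).1 + 1 : Nat)) (runSplit x xs).2).1,
         x :: (loopB (i + ((runSplit x xs).1 + 1 : Nat)) (runSplit x xs).2).2)
      else loopB (i + ((runSplit x xs).1 + 1 : Nat)) (runSplit x xs).2 := by
  rw [loopB]

theorem auxA_eq_loopB (N : Nat) : ∀ (ys : List Int), ys.length ≤ N → ∀ (p i : Int), 1 ≤ i →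
    (∀ y ∈ ys.head?, y ≠ p) → auxA i (p :: ys) = loopB i ys := by
  induction N with
  | zero =>
    intro ys hy p i hi _
    rcases ys with _ | ⟨c, t⟩
    · simp [auxA, loopB]
    · simp at hy
  | succ N ih =>
    intro ys hy p i hi hne
    rcases ys with _ | ⟨c, t⟩
    · simp [auxA, loopB]
    have hcp : c ≠ p := by simpa using hne
    obtain ⟨hdec, hner⟩ := runSplit_decomp c t
    rw [loopB_cons]
    rcases hn : (runSplit c t).1 with _ | m
    · -- run of length 1: head c alone
      have hrest : (runSplit c t).2 = t := by
        have := hdec; rw [hn] at this; simpa using this.symm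
      rw [hrest]
      have hcond : ¬ (1 ≤ i ∧ 2 ≤ (0:Nat) + 1) := by omega
      rw [if_neg hcond]
      rcases t with _ | ⟨a, t'⟩
      · simp [auxA, loopB]
      · have hac : a ≠ c := by
          have := hner; rw [hrest] at this; simpa using this
        have h1 : auxA i (p :: c :: a :: t') = auxA (i + 1) (c :: a :: t') := by
          rw [auxA]
          have : ¬ (p ≠ c ∧ c = a) := by
            intro ⟨_, hca⟩; exact hac hca.symm
          simp only [if_neg this]
        rw [h1]
        have := ih (a :: t') (by simp at hy ⊢; omega) c (i + 1) (by omega)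
          (by simpa using hac)
        rw [this]
        norm_num
    · -- run of length m+2: condition fires
      have hrest := hdec; rw [hn] at hrest
      have hlenrest : (runSplit c t).2.length + (m + 1) = t.length := by
        have := congrArg List.length hrest; simp at this; omega
      have hcond : (1 ≤ i ∧ 2 ≤ (m+1:Nat) + 1) := ⟨hi, by omega⟩
      rw [if_pos hcond]
      have h1 : auxA i (p :: c :: t) = (i :: (auxA (i+1) (c :: t)).1, c :: (auxA (i+1) (c :: t)).2) := by
        rcases t with _ | ⟨a, t'⟩
        · simp [runSplit] at hlenrest
        · rw [List.replicate_succ, List.cons_append] at hrest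
          have hac : a = c := (List.cons_eq_cons.mp hrest).1
          rw [auxA]
          have hcnd : p ≠ c ∧ c = a := ⟨fun h => hcp h.symm, hac.symm⟩
          simp only [if_pos hcnd]
      rw [h1]
      have h2 : auxA (i+1) (c :: t) = auxA (i + 1 + (m+1 : Nat)) (c :: (runSplit c t).2) := by
        conv_lhs => rw [hrest]
        exact auxA_skip (m+1) (i+1) c (runSplit c t).2
      rw [h2]
      have h3 := ih (runSplit c t).2 (by simp at hy; omega) c (i + 1 + (m+1:Nat)) (by push_cast; omega) hner
      rw [h3]
      have : i + 1 + ((m+1:Nat) : Int) = i + (((m+1:Nat) + 1 : Nat) : Int) := by push_cast; ring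
      rw [this]

theorem top_eq (p : Int) (ys : List Int) : auxA 1 (p :: ys) = loopB 0 (p :: ys) := by
  obtain ⟨hdec, hne⟩ := runSplit_decomp p ys
  conv_lhs => rw [hdec]
  rw [auxA_skip, loopB_cons]
  have h2 : ¬ ((1:Int) ≤ 0 ∧ 2 ≤ (runSplit p ys).1 + 1) := by omega
  rw [if_neg h2]
  have := auxA_eq_loopB (runSplit p ys).2.length (runSplit p ys).2 le_rfl p
    (1 + (runSplit p ys).1) (by omega) hne
  rw [this]
  congr 1
  push_cast
  ring

-- ===== VERDICT (by name: the statement is the Claim_ definition above) =====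
theorem plateouStart_spec : Claim_equal_plateouStart := by
  intro seq _
  unfold Spec_plateouStart plateouStart_alt
  rcases seq with _ | ⟨p, ys⟩
  · simp [plateouStart, PySem.List.slice, PySem.List.clampIdx, loopB]
  · rw [← top_eq]
    rw [plateouStart_eq_fold, slice_one_neg_one]
    have := fold_eq_auxA (p :: ys) (p :: ys).length 0 (by omega)
    simpa using this
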